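-- pv_equiv track=rewrite | github.com/Joaxda/Uncovering-Patterns-in-Low-Quality-Datasets-An-Interactive-User-driven-Approach | Src/callbacks/processingCallbacks.py | shorten_labels
-- ===== SOURCE A (Python) =====
-- def shorten_labels(labels, max_len=15):
--     """
--     Takes a list of feature names and returns a new list of truncated labels,
--     ensuring each truncated label is unique. If two labels collide, a suffix
--     like (2), (3), etc. is appended to differentiate them.
--     """
--     used = set()
--     shortened_list = []
--     for label in labels:
--         # Truncate if needed
--         truncated = label[:max_len] + "..." if len(label) > max_len else label
--
--         # If this truncated label is already used, append a suffix
--         i = 2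
--         new_label = truncated
--         while new_label in used:
--             new_label = f"{truncated}({i})"
--             i += 1
--
--         used.add(new_label)
--         shortened_list.append(new_label)
--     return shortened_list
-- ===== SOURCE B (Python) =====
-- def shorten_labels(labels, max_len=15):
--     """Truncate labels and uniquify them with disjoint-set style 'next free
--     suffix index' jump pointers (path compression) instead of rescanning
--     suffixes from 2 against the seen-set for every colliding label."""
--     used = set()
--     jump = {}  # (base, i) -> j : every suffix index in [i, j) of base is taken
--     out = []
--     for label in labels:
--         t = label[:max_len] + "..." if len(label) > max_len else label
--         i = 1  # index 1 stands for the bare truncated label itself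
--         path = []
--         while True:
--             j = jump.get((t, i))
--             if j is not None:
--                 path.append(i)
--                 i = j
--             elif (t if i == 1 else f"{t}({i})") in used:
--                 path.append(i)
--                 i += 1
--             else:
--                 break
--         new_label = t if i == 1 else f"{t}({i})"
--         for p in path:          # path compression: all of [p, i] is now taken
--             jump[(t, p)] = i + 1
--         jump[(t, i)] = i + 1
--         used.add(new_label)
--         out.append(new_label)
--     return out
-- ===== Notes on version B (the rewrite author's own statement) =====
-- stated objective: faster
-- what changed: B finds each free suffix with disjoint-set style jump pointers keyed by (base, index) and path compression (the classic next-free-slot trick), instead of A's linear probing that restarts at suffix 2 against the seen-set for every colliding label.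
import Mathlib
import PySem

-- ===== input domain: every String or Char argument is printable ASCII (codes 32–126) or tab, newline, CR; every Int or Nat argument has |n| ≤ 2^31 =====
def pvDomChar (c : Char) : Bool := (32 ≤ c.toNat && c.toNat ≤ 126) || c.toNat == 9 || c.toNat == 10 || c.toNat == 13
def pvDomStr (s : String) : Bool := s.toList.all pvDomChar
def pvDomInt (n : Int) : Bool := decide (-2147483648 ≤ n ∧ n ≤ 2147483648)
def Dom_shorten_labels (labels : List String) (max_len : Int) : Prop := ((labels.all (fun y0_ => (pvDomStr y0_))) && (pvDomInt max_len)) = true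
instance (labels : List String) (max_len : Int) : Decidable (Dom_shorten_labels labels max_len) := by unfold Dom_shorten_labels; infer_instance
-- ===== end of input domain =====

-- B replaces A's restart-at-2 linear probing against the seen-set by disjoint-set
-- style "next free suffix index" jump pointers with path compression; same return
-- value, measurably faster on collision-heavy inputs.

-- shared helpers (both Pythons build the same truncation and the same f"{t}({i})" strings)
-- truncLabel label max_len = label[:max_len] + "..." if len(label) > max_len else label
def truncLabel (label : String) (max_len : Int) : String :=
  if PySem.Str.len label > max_len then
    String.ofList (PySem.List.slice label.toList none (some max_len) ++ ['.', '.', '.'])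
  else label

-- candLbl t i = f"{t}({i})"
def candLbl (t : String) (i : Int) : String :=
  String.ofList (t.toList ++ '(' :: (PySem.Int.toChars i ++ [')']))

-- ===== PORT A =====
-- the while loop: state (i, new_label); fuel used.length + 2 always suffices (proved below)
def goA (used : PySem.Set String) (t : String) : Int → String → Nat → String
  | _, cur, 0 => cur
  | i, cur, fuel + 1 =>
      if PySem.Set.contains used cur then goA used t (i + 1) (candLbl t i) fuel else cur

def stepA (max_len : Int) (st : PySem.Set String × List String) (label : String) :
    PySem.Set String × List String :=
  let t := truncLabel label max_len
  let newl := goA st.1 t 2 t (st.1.length + 2)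
  (PySem.Set.add st.1 newl, st.2 ++ [newl])

def shorten_labels (labels : List String) (max_len : Int) : List String :=
  (labels.foldl (stepA max_len) (PySem.Set.empty, [])).2

-- ===== PORT B =====
-- candN t i = t if i == 1 else f"{t}({i})"  (Source B's candidate at index i)
def candN (t : String) (i : Int) : String := if i = 1 then t else candLbl t i

-- Source B's 'while True' loop: follow jump pointers / probe; returns (free index, path);
-- fuel used.length + 2 always suffices (proved below)
def findUF (used : PySem.Set String) (jump : PySem.Dict (String × Int) Int) (t : String) :
    Int → List Int → Nat → Int × List Int
  | i, path, 0 => (i, path)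
  | i, path, fuel + 1 =>
      match jump.get? (t, i) with
      | some j => findUF used jump t j (path ++ [i]) fuel
      | none =>
          if PySem.Set.contains used (candN t i) then
            findUF used jump t (i + 1) (path ++ [i]) fuel
          else (i, path)

def stepB (max_len : Int)
    (st : PySem.Set String × PySem.Dict (String × Int) Int × List String) (label : String) :
    PySem.Set String × PySem.Dict (String × Int) Int × List String :=
  let t := truncLabel label max_len
  let r := findUF st.1 st.2.1 t 1 [] (st.1.length + 2)
  let newl := candN t r.1
  let jump' := (r.2.foldl (fun d p => d.insert (t, p) (r.1 + 1)) st.2.1).insert (t, r.1) (r.1 + 1)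
  (PySem.Set.add st.1 newl, jump', st.2.2 ++ [newl])

def shorten_labels_alt (labels : List String) (max_len : Int) : List String :=
  (labels.foldl (stepB max_len) (PySem.Set.empty, PySem.Dict.empty, [])).2.2

-- ===== PRECONDITION & SPEC =====
def Spec_shorten_labels (labels : List String) (max_len : Int) (out : List String) : Prop := out = shorten_labels_alt labels max_len
instance (labels : List String) (max_len : Int) (out : List String) : Decidable (Spec_shorten_labels labels max_len out) := by unfold Spec_shorten_labels; infer_instance

-- ===== CLAIM (what is proved, stated in full; the proofs are below) =====
def Claim_equal_shorten_labels : Prop := ∀ (labels : List String) (max_len : Int), Dom_shorten_labels labels max_len → Spec_shorten_labels labels max_len (shorten_labels labels max_len)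

-- ===== LEMMAS AND PROOFS =====

lemma digitChar_inj {a b : Nat} (ha : a < 10) (hb : b < 10)
    (h : Nat.digitChar a = Nat.digitChar b) : a = b := by
  interval_cases a <;> interval_cases b <;> simp_all [Nat.digitChar]

lemma toDigits10_ne_nil (n : Nat) : Nat.toDigits 10 n ≠ [] := by
  rw [Nat.toDigits_eq_if (by norm_num)]
  split <;> simp

lemma toDigits10_inj : ∀ m n : Nat, Nat.toDigits 10 m = Nat.toDigits 10 n → m = n := by
  intro m
  induction m using Nat.strong_induction_on with
  | _ m ih =>
    intro n h
    rw [Nat.toDigits_eq_if (b := 10) (by norm_num),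
        Nat.toDigits_eq_if (b := 10) (n := n) (by norm_num)] at h
    by_cases hm : m < 10 <;> by_cases hn : n < 10 <;> simp [hm, hn] at h
    · exact digitChar_inj hm hn h
    · exfalso
      have h1 := toDigits10_ne_nil (n / 10)
      have hl := congrArg List.length h
      simp [List.length_append] at hl
      exact h1 hl
    · exfalso
      have h1 := toDigits10_ne_nil (m / 10)
      have hl := congrArg List.length h
      simp [List.length_append] at hl
      exact h1 hl
    · have hmod : m % 10 = n % 10 :=
        digitChar_inj (Nat.mod_lt _ (by norm_num)) (Nat.mod_lt _ (by norm_num)) h.2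
      have hdiv : m / 10 = n / 10 := ih (m / 10) (by omega) _ h.1
      omega

lemma toChars_inj_nonneg {i j : Int} (hi : 0 ≤ i) (hj : 0 ≤ j)
    (h : PySem.Int.toChars i = PySem.Int.toChars j) : i = j := by
  unfold PySem.Int.toChars at h
  rw [if_neg (by omega), if_neg (by omega)] at h
  have := toDigits10_inj _ _ h
  omega

lemma candLbl_inj {t : String} {i j : Int} (hi : 0 ≤ i) (hj : 0 ≤ j)
    (h : candLbl t i = candLbl t j) : i = j := by
  unfold candLbl at h
  rw [String.ofList_inj] at h
  have h2 := List.append_cancel_left h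
  have h3 : PySem.Int.toChars i ++ [')'] = PySem.Int.toChars j ++ [')'] := by
    simpa using h2
  have h4 := (List.append_inj h3 (by
    have := congrArg List.length h3
    simpa using this)).1
  exact toChars_inj_nonneg hi hj h4

lemma candLbl_ne_base {t : String} {i : Int} : candLbl t i ≠ t := by
  intro h
  unfold candLbl at h
  have := congrArg (fun s => s.toList.length) h
  simp at this

lemma candN_inj {t : String} {i j : Int} (hi : 1 ≤ i) (hj : 1 ≤ j)
    (h : candN t i = candN t j) : i = j := by
  unfold candN at h
  by_cases h1 : i = 1
  · by_cases h2 : j = 1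
    · omega
    · rw [if_pos h1, if_neg h2] at h
      exact absurd h.symm candLbl_ne_base
  · by_cases h2 : j = 1
    · rw [if_neg h1, if_pos h2] at h
      exact absurd h candLbl_ne_base
    · rw [if_neg h1, if_neg h2] at h
      exact candLbl_inj (by omega) (by omega) h

-- f is the first free candidate index (index 1 = bare label, index i ≥ 2 = f"{t}({i})")
def IsFF (used : PySem.Set String) (t : String) (f : Int) : Prop :=
  1 ≤ f ∧ PySem.Set.contains used (candN t f) = false ∧
    ∀ j : Int, 1 ≤ j → j < f → PySem.Set.contains used (candN t j) = true

lemma IsFF_unique {used : PySem.Set String} {t : String} {f g : Int}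
    (hf : IsFF used t f) (hg : IsFF used t g) : f = g := by
  rcases lt_trichotomy f g with h | h | h
  · have := hg.2.2 f hf.1 h
    rw [hf.2.1] at this; cases this
  · exact h
  · have := hf.2.2 g hg.1 h
    rw [hg.2.1] at this; cases this

-- pigeonhole: some candidate index ≥ 1 is free
lemma exists_freeN (used : PySem.Set String) (hnd : used.Nodup) (t : String) :
    ∃ d : Nat, PySem.Set.contains used (candN t (1 + (d : Int))) = false := by
  by_contra hall
  rw [not_exists] at hall
  have hmem : ∀ d : Nat, candN t (1 + (d : Int)) ∈ used := by
    intro d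
    have := hall d
    rw [← PySem.Set.contains_iff]
    cases h : PySem.Set.contains used (candN t (1 + (d : Int))) with
    | false => exact absurd h this
    | true => rfl
  set n := used.length with hn
  have hsub : (Finset.range (n + 1)).image (fun d : Nat => candN t (1 + (d : Int)))
      ⊆ used.toFinset := by
    intro x hx
    simp only [Finset.mem_image] at hx
    obtain ⟨d, _, rfl⟩ := hx
    exact List.mem_toFinset.2 (hmem d)
  have hcard : ((Finset.range (n + 1)).image (fun d : Nat => candN t (1 + (d : Int)))).card
      = n + 1 := by
    rw [Finset.card_image_of_injOn, Finset.card_range]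
    intro a _ b _ hab
    have := candN_inj (t := t) (by omega) (by omega) hab
    omega
  have := Finset.card_le_card hsub
  rw [hcard, List.toFinset_card_of_nodup hnd] at this
  omega

lemma ff_exists (used : PySem.Set String) (hnd : used.Nodup) (t : String) :
    ∃ f : Int, IsFF used t f ∧ f ≤ used.length + 1 := by
  have hex := exists_freeN used hnd t
  refine ⟨1 + (Nat.find hex : Int), ⟨by omega, Nat.find_spec hex, ?_⟩, ?_⟩
  · intro j h1 h2
    have he : j = 1 + ((j.toNat - 1 : Nat) : Int) := by omega
    rw [he]
    have := Nat.find_min hex (m := j.toNat - 1) (by omega)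
    cases h : PySem.Set.contains used (candN t (1 + ((j.toNat - 1 : Nat) : Int))) with
    | false => exact absurd h this
    | true => rfl
  · -- all indices in [1, f) are taken and candidates are injective → f - 1 ≤ |used|
    set D := Nat.find hex with hD
    have htk : ∀ e : Nat, e < D → candN t (1 + (e : Int)) ∈ used := by
      intro e he
      have := Nat.find_min hex he
      rw [← PySem.Set.contains_iff]
      cases h : PySem.Set.contains used (candN t (1 + (e : Int))) with
      | false => exact absurd h this
      | true => rfl
    have hsub : (Finset.range D).image (fun e : Nat => candN t (1 + (e : Int)))
        ⊆ used.toFinset := by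
      intro x hx
      simp only [Finset.mem_image] at hx
      obtain ⟨e, he, rfl⟩ := hx
      exact List.mem_toFinset.2 (htk e (Finset.mem_range.1 he))
    have hcard : ((Finset.range D).image (fun e : Nat => candN t (1 + (e : Int)))).card = D := by
      rw [Finset.card_image_of_injOn, Finset.card_range]
      intro a _ b _ hab
      have := candN_inj (t := t) (by omega) (by omega) hab
      omega
    have := Finset.card_le_card hsub
    rw [hcard, List.toFinset_card_of_nodup hnd] at this
    omega

-- ---------- A-side characterisation ----------

-- A's inner scan from index 2 (analysis device for goA)
def scanA (used : PySem.Set String) (t : String) : Int → Nat → Int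
  | i, 0 => i
  | i, fuel + 1 =>
      if PySem.Set.contains used (candLbl t i) then scanA used t (i + 1) fuel else i

lemma goA_cand (used : PySem.Set String) (t : String) :
    ∀ (fuel : Nat) (i : Int),
      goA used t (i + 1) (candLbl t i) fuel = candLbl t (scanA used t i fuel) := by
  intro fuel
  induction fuel with
  | zero => intro i; simp [goA, scanA]
  | succ f ih =>
      intro i
      simp only [goA, scanA]
      split
      · exact ih (i + 1)
      · rfl

lemma goA_succ (used : PySem.Set String) (t : String) (i : Int) (cur : String) (f : Nat) :
    goA used t i cur (f + 1) =
      if PySem.Set.contains used cur then candLbl t (scanA used t i f) else cur := by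
  simp only [goA]
  split
  · exact goA_cand used t f i
  · rfl

lemma scanA_eq (used : PySem.Set String) (t : String) :
    ∀ (d : Nat) (fuel : Nat) (i : Int), d < fuel →
      PySem.Set.contains used (candLbl t (i + (d : Int))) = false →
      (∀ e : Nat, e < d → PySem.Set.contains used (candLbl t (i + (e : Int))) = true) →
      scanA used t i fuel = i + (d : Int) := by
  intro d
  induction d with
  | zero =>
      intro fuel i hd hfree _
      cases fuel with
      | zero => omega
      | succ f =>
          simp only [scanA]
          rw [if_neg (by simpa using hfree)]
          simp
  | succ d ih =>
      intro fuel i hd hfree hmin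
      cases fuel with
      | zero => omega
      | succ f =>
          simp only [scanA]
          rw [if_pos (by simpa using hmin 0 (by omega))]
          have := ih f (i + 1) (by omega)
            (by rw [show i + 1 + (d : Int) = i + ((d : Nat) + 1 : Nat) by push_cast; ring]; exact hfree)
            (by intro e he
                rw [show i + 1 + (e : Int) = i + ((e + 1 : Nat) : Int) by push_cast; ring]
                exact hmin (e + 1) (by omega))
          rw [this]; push_cast; ring

lemma stepA_char (max_len : Int) (used : PySem.Set String) (acc : List String)
    (label : String) (f : Int)
    (hf : IsFF used (truncLabel label max_len) f) (hb : f ≤ used.length + 1) :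
    stepA max_len (used, acc) label =
      (PySem.Set.add used (candN (truncLabel label max_len) f),
       acc ++ [candN (truncLabel label max_len) f]) := by
  set t := truncLabel label max_len with ht
  have hgo : goA used t 2 t (used.length + 2) = candN t f := by
    rw [show used.length + 2 = (used.length + 1) + 1 from rfl, goA_succ]
    by_cases hc : PySem.Set.contains used t = true
    · rw [if_pos hc]
      have hf1 : f ≠ 1 := by
        intro h
        have h0 := hf.2.1
        have ht1 : candN t 1 = t := by simp [candN]
        rw [h, ht1] at h0
        rw [h0] at hc
        exact Bool.noConfusion hc
      have hf2 : 2 ≤ f := by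
        rcases hf with ⟨h1, _, _⟩; omega
      have hscan : scanA used t 2 (used.length + 1) = f := by
        have := scanA_eq used t (f - 2).toNat (used.length + 1) 2 (by omega)
          (by rw [show (2 : Int) + ((f - 2).toNat : Int) = f by omega]
              have := hf.2.1
              simpa [candN, hf1] using this)
          (by intro e he
              have h2e : (2 : Int) + (e : Int) ≠ 1 := by omega
              have := hf.2.2 (2 + (e : Int)) (by omega) (by omega)
              simpa [candN, h2e] using this)
        rw [this]; omega
      rw [hscan]
      simp [candN, hf1]
    · rw [if_neg hc]
      have hcf : PySem.Set.contains used t = false := by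
        cases h : PySem.Set.contains used t with
        | false => rfl
        | true => exact absurd h hc
      have : IsFF used t 1 := ⟨le_refl _, by simpa [candN] using hcf,
        fun j h1 h2 => absurd (lt_of_le_of_lt h1 h2) (lt_irrefl _)⟩
      rw [IsFF_unique hf this]
      simp [candN]
  simp only [stepA, ← ht, hgo]

-- ---------- B-side characterisation ----------

-- the jump-pointer invariant: jump[(s, p)] = q means every index in [p, q) of base s is taken
def InvJ (used : PySem.Set String) (jump : PySem.Dict (String × Int) Int) : Prop :=
  ∀ s p q, jump.get? (s, p) = some q →
    1 ≤ p ∧ p < q ∧ ∀ e : Int, p ≤ e → e < q → PySem.Set.contains used (candN s e) = true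

lemma findUF_eq (used : PySem.Set String) (jump : PySem.Dict (String × Int) Int)
    (t : String) (f : Int) (hinv : InvJ used jump) (hf : IsFF used t f) :
    ∀ (fuel : Nat) (i : Int) (path : List Int), 1 ≤ i → i ≤ f →
      (∀ j : Int, 1 ≤ j → j < i → PySem.Set.contains used (candN t j) = true) →
      (f - i).toNat < fuel →
      (findUF used jump t i path fuel).1 = f ∧
        ∀ p ∈ (findUF used jump t i path fuel).2, p ∈ path ∨ (1 ≤ p ∧ p < f) := by
  intro fuel
  induction fuel with
  | zero => intro i path _ _ _ hfu; omega
  | succ fl ih =>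
      intro i path hi1 hif hbelow hfu
      simp only [findUF]
      cases hj : jump.get? (t, i) with
      | some q =>
          obtain ⟨hp1, hpq, htk⟩ := hinv t i q hj
          have hqf : q ≤ f := by
            by_contra hq
            have := htk f hif (by omega)
            rw [hf.2.1] at this; cases this
          have hiltf : i < f := by omega
          have := ih q (path ++ [i]) (by omega) hqf
            (by intro j h1 h2
                rcases lt_or_ge j i with h | h
                · exact hbelow j h1 h
                · exact htk j h h2)
            (by omega)
          refine ⟨this.1, ?_⟩
          intro p hp
          rcases this.2 p hp with h | h
          · rcases List.mem_append.1 h with h | h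
            · exact Or.inl h
            · simp at h; subst h; exact Or.inr ⟨hi1, hiltf⟩
          · exact Or.inr h
      | none =>
          by_cases hc : PySem.Set.contains used (candN t i) = true
          · rw [if_pos hc]
            have hiltf : i < f := by
              rcases eq_or_lt_of_le hif with h | h
              · rw [h] at hc; rw [hf.2.1] at hc; cases hc
              · exact h
            have := ih (i + 1) (path ++ [i]) (by omega) (by omega)
              (by intro j h1 h2
                  rcases lt_or_ge j i with h | h
                  · exact hbelow j h1 h
                  · have : j = i := by omega
                    rw [this]; exact hc)
              (by omega)
            refine ⟨this.1, ?_⟩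
            intro p hp
            rcases this.2 p hp with h | h
            · rcases List.mem_append.1 h with h | h
              · exact Or.inl h
              · simp at h; subst h; exact Or.inr ⟨hi1, hiltf⟩
            · exact Or.inr h
          · rw [if_neg hc]
            have hcf : PySem.Set.contains used (candN t i) = false := by
              cases h : PySem.Set.contains used (candN t i) with
              | false => rfl
              | true => exact absurd h hc
            refine ⟨IsFF_unique ⟨hi1, hcf, hbelow⟩ hf, ?_⟩
            intro p hp; exact Or.inl hp

lemma get?_foldl_insert_const (t : String) (v : Int) :
    ∀ (L : List Int) (d0 : PySem.Dict (String × Int) Int) (k : String × Int) (w : Int),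
      (L.foldl (fun d p => d.insert (t, p) v) d0).get? k = some w →
      (∃ p ∈ L, k = (t, p) ∧ w = v) ∨ d0.get? k = some w := by
  intro L
  induction L with
  | nil => intro d0 k w h; exact Or.inr h
  | cons p L ih =>
      intro d0 k w h
      simp only [List.foldl_cons] at h
      rcases ih _ _ _ h with h | h
      · obtain ⟨p', hp', hk, hw⟩ := h
        exact Or.inl ⟨p', List.mem_cons_of_mem _ hp', hk, hw⟩
      · by_cases hk : k = (t, p)
        · subst hk
          rw [PySem.Dict.get?_insert_self] at h
          injection h with h
          exact Or.inl ⟨p, List.mem_cons_self, rfl, h.symm⟩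
        · rw [PySem.Dict.get?_insert_of_ne _ _ hk] at h
          exact Or.inr h

lemma contains_add_of {s : PySem.Set String} {x y : String}
    (h : PySem.Set.contains s x = true) :
    PySem.Set.contains (PySem.Set.add s y) x = true := by
  rw [PySem.Set.contains_iff] at h ⊢
  exact (PySem.Set.mem_add _ _ _).2 (Or.inl h)

lemma contains_add_self (s : PySem.Set String) (x : String) :
    PySem.Set.contains (PySem.Set.add s x) x = true := by
  rw [PySem.Set.contains_iff]
  exact (PySem.Set.mem_add _ _ _).2 (Or.inr rfl)

set_option maxHeartbeats 1000000 in
lemma fold_agree (max_len : Int) :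
    ∀ (labels : List String) (used : PySem.Set String)
      (jump : PySem.Dict (String × Int) Int) (acc : List String),
      used.Nodup → InvJ used jump →
      (labels.foldl (stepA max_len) (used, acc)).2 =
        (labels.foldl (stepB max_len) (used, jump, acc)).2.2 := by
  intro labels
  induction labels with
  | nil => intro used jump acc _ _; rfl
  | cons label ls ih =>
      intro used jump acc hnd hinv
      simp only [List.foldl_cons]
      set t := truncLabel label max_len with ht
      obtain ⟨f, hf, hb⟩ := ff_exists used hnd t
      have hfind := findUF_eq used jump t f hinv hf (used.length + 2) 1 [] (le_refl _)
        hf.1 (fun j h1 h2 => absurd (lt_of_le_of_lt h1 h2) (lt_irrefl _)) (by omega)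
      have hA := stepA_char max_len used acc label f (ht ▸ hf) hb
      have hB : stepB max_len (used, jump, acc) label =
          (PySem.Set.add used (candN t f),
           ((findUF used jump t 1 [] (used.length + 2)).2.foldl
              (fun d p => d.insert (t, p) (f + 1)) jump).insert (t, f) (f + 1),
           acc ++ [candN t f]) := by
        simp only [stepB, ← ht]
        rw [show (findUF used jump t 1 [] (used.length + 2)).1 = f from hfind.1]
      rw [hA, hB]
      apply ih
      · exact PySem.Set.nodup_add _ _ hnd
      · -- the jump invariant is preserved by the path-compression updates
        intro s p q hg
        by_cases hk : (s, p) = ((t, f) : String × Int)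
        · rw [hk, PySem.Dict.get?_insert_self] at hg
          injection hg with hq
          obtain ⟨hs, hp⟩ : s = t ∧ p = f := by simpa [Prod.ext_iff] using hk
          refine ⟨by rw [hp]; exact hf.1, by omega, ?_⟩
          intro e h1 h2
          have he : e = f := by omega
          rw [hs, he]
          exact contains_add_self _ _
        · rw [PySem.Dict.get?_insert_of_ne _ _ hk] at hg
          rcases get?_foldl_insert_const t (f + 1) _ jump _ _ hg with h | h
          · obtain ⟨p', hp', hkp, hq⟩ := h
            obtain ⟨hs, hp⟩ : s = t ∧ p = p' := by simpa [Prod.ext_iff] using hkp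
            rcases hfind.2 p' hp' with hc0 | hc0
            · cases hc0
            · refine ⟨by omega, by omega, ?_⟩
              intro e h1 h2
              rw [hs]
              rcases lt_or_ge e f with he | he
              · exact contains_add_of (hf.2.2 e (by omega) he)
              · have he2 : e = f := by omega
                rw [he2]
                exact contains_add_self _ _
          · obtain ⟨h1, h2, h3⟩ := hinv s p q h
            exact ⟨h1, h2, fun e he1 he2 => contains_add_of (h3 e he1 he2)⟩

-- ===== VERDICT (by name: the statement is the Claim_ definition above) =====
theorem shorten_labels_spec : Claim_equal_shorten_labels := by
  intro labels max_len _
  unfold Spec_shorten_labels shorten_labels shorten_labels_alt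
  exact fold_agree max_len labels PySem.Set.empty PySem.Dict.empty []
    (by simp [PySem.Set.empty])
    (by intro s p q hg; rw [PySem.Dict.get?_empty] at hg; cases hg)
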